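-- pv_equiv track=rewrite | github.com/gwy15/leetcode | src/乐扣杯/2. 早餐组合.py | breakfastNumber
-- ===== SOURCE A (Python) =====
-- from typing import List
-- import bisect
--
-- def breakfastNumber(staple: List[int], drinks: List[int], x: int) -> int:
--     staple.sort()
--     drinks.sort()
--     #
--     count = 0
--     for i, money in enumerate(staple):
--         if money >= x:
--             break
--         # find out how much drinks can he has
--         available = bisect.bisect_right(drinks, x - money)
--         count = (count + available) % 1000000007
--
--     return count
-- ===== SOURCE B (Python) =====
-- from typing import List
--
-- def breakfastNumber(staple: List[int], drinks: List[int], x: int) -> int: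
--     # Two-pointer pass instead of per-element binary search: sort both (in place,
--     # like A), walk staples ascending while a single pointer over drinks only
--     # moves down, since the budget x - money shrinks as money grows.
--     staple.sort()
--     drinks.sort()
--     count = 0
--     j = len(drinks) - 1
--     for money in staple:
--         if money >= x:
--             break
--         t = x - money
--         while j >= 0 and drinks[j] > t:
--             j -= 1
--         count = (count + j + 1) % 1000000007
--     return count
-- ===== Notes on version B (the rewrite author's own statement) =====
-- stated objective: alternative
-- what changed: Replaced the per-staple binary search (bisect_right on sorted drinks) by a single descending two-pointer sweep: one pointer over sorted drinks only moves down as staples grow, so all inner searches collapse into one linear pass.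
import Mathlib
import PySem

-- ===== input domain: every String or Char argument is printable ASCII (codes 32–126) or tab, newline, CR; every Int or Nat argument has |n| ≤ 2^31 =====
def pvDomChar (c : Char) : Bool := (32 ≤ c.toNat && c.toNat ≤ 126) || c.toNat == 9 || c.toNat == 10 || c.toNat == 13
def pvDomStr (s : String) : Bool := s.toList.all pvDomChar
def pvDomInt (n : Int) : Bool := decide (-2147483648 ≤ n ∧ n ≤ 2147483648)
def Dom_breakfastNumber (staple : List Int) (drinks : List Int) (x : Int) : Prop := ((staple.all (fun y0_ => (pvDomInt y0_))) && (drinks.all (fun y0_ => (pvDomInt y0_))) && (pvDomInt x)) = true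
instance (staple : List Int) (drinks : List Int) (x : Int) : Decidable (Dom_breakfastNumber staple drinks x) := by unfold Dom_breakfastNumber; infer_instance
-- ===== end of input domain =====

-- B replaces A's per-staple binary search by a single descending two-pointer pass over
-- the sorted drinks (objective: alternative; same sort-dominated cost). Both A and B
-- sort their list arguments in place; the equivalence proved here is about the return value.

-- ===== PORT A =====
-- the loop over enumerate(staple): the index i is unused, so we recurse over the
-- sorted staple list carrying count; `break` returns count immediately.
def aLoop (drinks : List Int) (x : Int) : List Int → Int → Int
  | [], count => count
  | money :: rest, count =>
    if money ≥ x then count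
    else aLoop drinks x rest
      (PySem.Int.mod (count + ((PySem.List.bisectRight drinks (x - money) : Nat) : Int)) 1000000007)

def breakfastNumber (staple : List Int) (drinks : List Int) (x : Int) : Int :=
  aLoop (PySem.List.sorted drinks (fun y => y)) x (PySem.List.sorted staple (fun y => y)) 0

-- ===== PORT B =====
-- the inner 'while j >= 0 and drinks[j] > t: j -= 1'; j stays < len(drinks) along the
-- run, so drinks[j] is ported as getD j.toNat 0 (exact on all reachable states).
def dropGo (drinks : List Int) (t : Int) (j : Int) : Int :=
  if h : 0 ≤ j ∧ t < drinks.getD j.toNat 0 then dropGo drinks t (j - 1) else j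
termination_by (j + 1).toNat
decreasing_by omega

def bLoop (drinks : List Int) (x : Int) : List Int → Int → Int → Int
  | [], count, _ => count
  | money :: rest, count, j =>
    if money ≥ x then count
    else
      let j' := dropGo drinks (x - money) j
      bLoop drinks x rest (PySem.Int.mod (count + j' + 1) 1000000007) j'

def breakfastNumber_alt (staple : List Int) (drinks : List Int) (x : Int) : Int :=
  bLoop (PySem.List.sorted drinks (fun y => y)) x (PySem.List.sorted staple (fun y => y)) 0
    ((drinks.length : Int) - 1)

-- ===== PRECONDITION & SPEC =====
def Spec_breakfastNumber (staple : List Int) (drinks : List Int) (x : Int) (out : Int) : Prop := out = breakfastNumber_alt staple drinks x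
instance (staple : List Int) (drinks : List Int) (x : Int) (out : Int) : Decidable (Spec_breakfastNumber staple drinks x out) := by unfold Spec_breakfastNumber; infer_instance

-- ===== CLAIM (what is proved, stated in full; the proofs are below) =====
def Claim_equal_breakfastNumber : Prop := ∀ (staple : List Int) (drinks : List Int) (x : Int), Dom_breakfastNumber staple drinks x → Spec_breakfastNumber staple drinks x (breakfastNumber staple drinks x)

-- ===== LEMMAS AND PROOFS =====

-- a split point r with everything below ≤ key and everything above > key is the countP
theorem countP_of_split (d : List Int) (key : Int) (r : Nat) (hr : r ≤ d.length)
    (h1 : ∀ (j : Nat) (hj : j < d.length), j < r → d[j] ≤ key)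
    (h2 : ∀ (j : Nat) (hj : j < d.length), r ≤ j → key < d[j]) :
    d.countP (fun a => decide (a ≤ key)) = r := by
  have hsplit : d = d.take r ++ d.drop r := (List.take_append_drop r d).symm
  have htake : (d.take r).countP (fun a => decide (a ≤ key)) = r := by
    have hall : ∀ a ∈ d.take r, (fun a => decide (a ≤ key)) a = true := by
      intro a ha
      obtain ⟨i, hi, hga⟩ := List.mem_iff_getElem.mp ha
      have hil : i < d.length := lt_of_lt_of_le (lt_of_lt_of_le hi (by simp)) le_rfl
      have : i < r := by have := hi; simp [List.length_take] at this; omega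
      have hd : d[i] ≤ key := h1 i (by omega) this
      have : (d.take r)[i] = d[i] := by simp [List.getElem_take]
      simp [← hga, this, hd]
    rw [List.countP_eq_length.mpr hall, List.length_take]
    omega
  have hdrop : (d.drop r).countP (fun a => decide (a ≤ key)) = 0 := by
    rw [List.countP_eq_zero]
    intro a ha
    obtain ⟨i, hi, hga⟩ := List.mem_iff_getElem.mp ha
    have hlen : i < d.length - r := by simpa using hi
    have : (d.drop r)[i] = d[r + i] := by simp [List.getElem_drop]
    have hk : key < d[r + i]'(by omega) := h2 (r + i) (by omega) (by omega)
    simp [← hga, this]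
    omega
  calc d.countP (fun a => decide (a ≤ key))
      = (d.take r).countP (fun a => decide (a ≤ key)) + (d.drop r).countP (fun a => decide (a ≤ key)) := by
        rw [← List.countP_append, ← hsplit]
    _ = r := by rw [htake, hdrop]; omega

theorem dropGo_spec (d : List Int) (t : Int) :
    ∀ (n : Nat) (j : Int), (j + 1).toNat = n → -1 ≤ j → j < (d.length : Int) →
    (∀ (i : Nat) (hi : i < d.length), j < (i : Int) → t < d[i]) →
    (-1 ≤ dropGo d t j ∧ dropGo d t j ≤ j ∧
     (∀ (i : Nat) (hi : i < d.length), dropGo d t j < (i : Int) → t < d[i]) ∧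
     (0 ≤ dropGo d t j → ∀ (hi : (dropGo d t j).toNat < d.length), d[(dropGo d t j).toNat] ≤ t)) := by
  intro n
  induction n using Nat.strong_induction_on with
  | _ n ih =>
    intro j hn hj1 hj2 hup
    rw [dropGo]
    by_cases h : 0 ≤ j ∧ t < d.getD j.toNat 0
    · rw [dif_pos h]
      have hjnat : j.toNat < d.length := by omega
      have hdj : t < d[j.toNat] := by
        have := h.2
        rwa [List.getD_eq_getElem d 0 hjnat] at this
      have hup' : ∀ (i : Nat) (hi : i < d.length), j - 1 < (i : Int) → t < d[i] := by
        intro i hi hgt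
        by_cases hij : j < (i : Int)
        · exact hup i hi hij
        · have : i = j.toNat := by omega
          subst this; exact hdj
      have hrec := ih j.toNat (by omega) (j - 1) (by omega) (by omega) (by omega) hup'
      exact ⟨by omega, by omega, hrec.2.2.1, hrec.2.2.2⟩
    · rw [dif_neg h]
      refine ⟨hj1, le_refl j, hup, ?_⟩
      intro hj0 hi
      have : ¬ t < d.getD j.toNat 0 := fun ht => h ⟨hj0, ht⟩
      rwa [List.getD_eq_getElem d 0 hi, not_lt] at this

-- the two-pointer step computes bisect_right: j'+1 is the split point of countP_of_split
theorem step_eq (d : List Int) (hd : d.Pairwise (· ≤ ·)) (t j : Int)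
    (hj1 : -1 ≤ j) (hj2 : j < (d.length : Int))
    (hup : ∀ (i : Nat) (hi : i < d.length), j < (i : Int) → t < d[i]) :
    dropGo d t j + 1 = ((PySem.List.bisectRight d t : Nat) : Int) := by
  obtain ⟨h1, h2, h3, h4⟩ := dropGo_spec d t (j + 1).toNat j rfl hj1 hj2 hup
  set j' := dropGo d t j with hj'
  have hpw := List.pairwise_iff_getElem.mp hd
  have hcnt1 : d.countP (fun a => decide (a ≤ t)) = (j' + 1).toNat := by
    apply countP_of_split
    · omega
    · intro i hi hir
      have hj0 : 0 ≤ j' := by omega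
      have hjn : j'.toNat < d.length := by omega
      have hle : d[j'.toNat] ≤ t := h4 hj0 hjn
      rcases Nat.lt_or_ge i j'.toNat with hlt | hge
      · exact le_trans (hpw i j'.toNat hi hjn hlt) hle
      · have : i = j'.toNat := by omega
        subst this; exact hle
    · intro i hi hir
      exact h3 i hi (by omega)
  obtain ⟨hb1, hb2, hb3⟩ := PySem.List.bisectRight_spec d t hd
  have hcnt2 : d.countP (fun a => decide (a ≤ t)) = PySem.List.bisectRight d t := by
    apply countP_of_split
    · exact hb1
    · intro i hi hir; exact hb2 i hi hir
    · intro i hi hir; exact hb3 i hi hir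
  omega

theorem loop_eq (d : List Int) (hd : d.Pairwise (· ≤ ·)) (x : Int) :
    ∀ (s : List Int), s.Pairwise (· ≤ ·) → ∀ (c j : Int), -1 ≤ j → j < (d.length : Int) →
    (∀ m ∈ s, ∀ (i : Nat) (hi : i < d.length), j < (i : Int) → x - m < d[i]) →
    bLoop d x s c j = aLoop d x s c := by
  intro s
  induction s with
  | nil => intro _ c j _ _ _; rfl
  | cons money rest ihs =>
    intro hs c j hj1 hj2 hup
    by_cases hbreak : money ≥ x
    · simp [bLoop, aLoop, hbreak]
    · rw [bLoop, aLoop, if_neg hbreak, if_neg hbreak]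
      have hupm := hup money (List.mem_cons_self ..)
      have hstep := step_eq d hd (x - money) j hj1 hj2 hupm
      obtain ⟨h1, h2, h3, _⟩ := dropGo_spec d (x - money) (j + 1).toNat j rfl hj1 hj2 hupm
      have harg : c + dropGo d (x - money) j + 1
          = c + ((PySem.List.bisectRight d (x - money) : Nat) : Int) := by omega
      show bLoop d x rest (PySem.Int.mod (c + dropGo d (x - money) j + 1) 1000000007)
        (dropGo d (x - money) j) = _
      rw [harg]
      apply ihs (List.Pairwise.of_cons hs) _ _ (by omega) (by omega)
      intro m hm i hi hgt
      have hmm : money ≤ m := (List.pairwise_cons.mp hs).1 m hm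
      have := h3 i hi hgt
      omega

theorem breakfastNumber_spec : Claim_equal_breakfastNumber := by
  intro staple drinks x _
  unfold Spec_breakfastNumber breakfastNumber breakfastNumber_alt
  have hlen : (PySem.List.sorted drinks (fun y => y)).length = drinks.length :=
    PySem.List.length_sorted ..
  refine (loop_eq _ (PySem.List.sorted_pairwise drinks (fun y => y)) x
    (PySem.List.sorted staple (fun y => y)) (PySem.List.sorted_pairwise staple (fun y => y))
    0 _ (by omega) (by rw [hlen]; omega) ?_).symm
  intro m _ i hi hgt
  rw [hlen] at hi
  omega
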